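-- pv_equiv track=rewrite | github.com/PhatHuynhTranSon99/Word2Vec-Implementation | scripts/train.py | get_context_words
-- ===== SOURCE A (Python) =====
-- def get_context_words(sentence, center_word_position, window_size=5):
--     """
--     Get the context window for a word in a sentence based on the window size
--     """
--     window_start_position = max(0, center_word_position - window_size)
--     window_end_position = min(len(sentence) - 1, center_word_position + window_size)
--
--     context = []
--     for position in range(window_start_position, window_end_position + 1):
--         if position != center_word_position:
--             context.append(sentence[position])
--
--     return context
-- ===== SOURCE B (Python) =====
-- def get_context_words(sentence, center_word_position, window_size=5):
--     """Context window via two bulk slices instead of an element-by-element loop."""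
--     n = len(sentence)
--     lo = max(0, center_word_position - window_size)
--     hi = max(0, min(n, center_word_position + window_size + 1))
--     if lo <= center_word_position < hi:
--         return list(sentence[lo:center_word_position]) + list(sentence[center_word_position + 1:hi])
--     return list(sentence[lo:hi])
-- ===== Notes on version B (the rewrite author's own statement) =====
-- stated objective: alternative
-- what changed: Replaces the per-index loop with a skip test by clamping the window bounds once and concatenating two contiguous slices (before and after the center), or one slice when the center lies outside the window.
import Mathlib
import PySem

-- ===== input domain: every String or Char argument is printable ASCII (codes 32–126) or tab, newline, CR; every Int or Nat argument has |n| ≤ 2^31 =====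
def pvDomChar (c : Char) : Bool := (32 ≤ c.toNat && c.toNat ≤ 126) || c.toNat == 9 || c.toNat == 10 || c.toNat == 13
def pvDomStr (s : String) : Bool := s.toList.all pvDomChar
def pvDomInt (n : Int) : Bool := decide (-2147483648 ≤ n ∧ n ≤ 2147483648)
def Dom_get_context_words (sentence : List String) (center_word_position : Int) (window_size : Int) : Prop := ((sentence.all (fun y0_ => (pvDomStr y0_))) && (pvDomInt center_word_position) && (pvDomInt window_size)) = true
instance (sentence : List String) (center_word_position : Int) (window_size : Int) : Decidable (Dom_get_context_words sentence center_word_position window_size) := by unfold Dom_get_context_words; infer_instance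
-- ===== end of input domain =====

-- B replaces A's per-index loop with two bulk slices around the center (alternative decomposition, same cost).

-- ===== PORT A =====
-- literal port of A: clamp both window ends, then loop over the index range appending
-- every word whose position differs from the center (indices in the range are always
-- in bounds, so sentence[position] never raises; pyGetD's default is never used).
def get_context_words (sentence : List String) (center_word_position : Int) (window_size : Int) : List String :=
  let window_start_position : Int := max 0 (center_word_position - window_size)
  let window_end_position : Int := min ((sentence.length : Int) - 1) (center_word_position + window_size)
  (PySem.List.pyRange window_start_position (window_end_position + 1) 1).foldl
    (fun context position =>
      if position ≠ center_word_position then context ++ [PySem.List.pyGetD sentence position ""] else context)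
    []

-- ===== PORT B =====
-- literal port of Source B: clamp lo/hi into [0, n], then one or two contiguous slices.
def get_context_words_alt (sentence : List String) (center_word_position : Int) (window_size : Int) : List String :=
  let n : Int := (sentence.length : Int)
  let lo : Int := max 0 (center_word_position - window_size)
  let hi : Int := max 0 (min n (center_word_position + window_size + 1))
  if lo ≤ center_word_position ∧ center_word_position < hi then
    PySem.List.slice sentence (some lo) (some center_word_position)
      ++ PySem.List.slice sentence (some (center_word_position + 1)) (some hi)
  else
    PySem.List.slice sentence (some lo) (some hi)

-- ===== PRECONDITION & SPEC =====
def Spec_get_context_words (sentence : List String) (center_word_position : Int) (window_size : Int) (out : List String) : Prop := out = get_context_words_alt sentence center_word_position window_size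
instance (sentence : List String) (center_word_position : Int) (window_size : Int) (out : List String) : Decidable (Spec_get_context_words sentence center_word_position window_size out) := by unfold Spec_get_context_words; infer_instance

-- ===== CLAIM (what is proved, stated in full; the proofs are below) =====
def Claim_equal_get_context_words : Prop := ∀ (sentence : List String) (center_word_position : Int) (window_size : Int), Dom_get_context_words sentence center_word_position window_size → Spec_get_context_words sentence center_word_position window_size (get_context_words sentence center_word_position window_size)

-- ===== LEMMAS AND PROOFS =====

-- mapping the loop's indexing function over an in-bounds index range is a drop/take slice
theorem pv_map_get_range (xs : List String) (a b : Nat) (hb : b ≤ xs.length) :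
    (PySem.List.pyRange (a : Int) (b : Int) 1).map (fun i => PySem.List.pyGetD xs i "") =
      (xs.drop a).take (b - a) := by
  induction b generalizing a with
  | zero =>
    rw [PySem.List.pyRange_one_eq_nil (by exact_mod_cast Nat.zero_le a)]
    simp
  | succ m ih =>
    by_cases hab : a ≤ m
    · have h1 : (a : Int) ≤ (m : Int) := by exact_mod_cast hab
      have hc : ((m : Int) + 1) = ((m + 1 : Nat) : Int) := by push_cast; ring
      rw [← hc, PySem.List.pyRange_one_succ_right h1, List.map_append, ih a (by omega)]
      have hm : m < xs.length := by omega
      simp only [List.map_cons, List.map_nil, PySem.List.pyGetD_natCast]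
      rw [List.getD_eq_getElem _ _ hm]
      have hsucc : m + 1 - a = (m - a) + 1 := by omega
      rw [hsucc, List.take_add_one]
      congr 1
      rw [List.getElem?_drop]
      have : a + (m - a) = m := by omega
      simp [this, List.getElem?_eq_getElem hm]
    · rw [PySem.List.pyRange_one_eq_nil (by exact_mod_cast Nat.succ_le_of_lt (by omega))]
      have : m + 1 - a = 0 := by omega
      simp [this]

-- when the center is outside [a, b), the loop's skip test never fires
theorem pv_filter_all_ne (a b c : Int) (h : c < a ∨ b ≤ c) :
    (PySem.List.pyRange a b 1).filter (fun i => decide (i ≠ c)) = PySem.List.pyRange a b 1 := by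
  apply List.filter_eq_self.mpr
  intro x hx
  have := (PySem.List.mem_pyRange_one).1 hx
  simp
  omega

-- when the center is inside [a, b), filtering it out splits the range in two
theorem pv_filter_split (a b c : Int) (h1 : a ≤ c) (h2 : c < b) :
    (PySem.List.pyRange a b 1).filter (fun i => decide (i ≠ c)) =
      PySem.List.pyRange a c 1 ++ PySem.List.pyRange (c + 1) b 1 := by
  rw [PySem.List.pyRange_one_append a c b h1 (le_of_lt h2),
    PySem.List.pyRange_one_cons h2, List.filter_append, List.filter_cons]
  simp only [ne_eq, not_true_eq_false, decide_false, Bool.false_eq_true, if_false]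
  rw [pv_filter_all_ne a c c (by omega), pv_filter_all_ne (c + 1) b c (by omega)]

-- the filtered-and-mapped window equals B's slice expression, for Nat-cast bounds
theorem pv_core (xs : List String) (lo hi : Nat) (c : Int) (hhi : hi ≤ xs.length) :
    ((PySem.List.pyRange (lo : Int) (hi : Int) 1).filter (fun i => decide (i ≠ c))).map
        (fun i => PySem.List.pyGetD xs i "") =
      if (lo : Int) ≤ c ∧ c < (hi : Int) then
        PySem.List.slice xs (some (lo : Int)) (some c)
          ++ PySem.List.slice xs (some (c + 1)) (some (hi : Int))
      else PySem.List.slice xs (some (lo : Int)) (some (hi : Int)) := by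
  by_cases hc : (lo : Int) ≤ c ∧ c < (hi : Int)
  · rw [if_pos hc]
    obtain ⟨cn, rfl⟩ : ∃ cn : Nat, c = (cn : Int) := ⟨c.toNat, by omega⟩
    have h1 : (cn : Int) + 1 = ((cn + 1 : Nat) : Int) := by push_cast; ring
    rw [pv_filter_split _ _ _ hc.1 hc.2, List.map_append,
      pv_map_get_range xs lo cn (by omega), h1,
      pv_map_get_range xs (cn + 1) hi hhi,
      PySem.List.slice_natCast, PySem.List.slice_natCast]
  · rw [if_neg hc, pv_filter_all_ne _ _ _ (by omega),
      pv_map_get_range xs lo hi hhi, PySem.List.slice_natCast]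

theorem get_context_words_eq (sentence : List String) (c w : Int) :
    get_context_words sentence c w = get_context_words_alt sentence c w := by
  unfold get_context_words get_context_words_alt
  simp only []
  set n : Int := (sentence.length : Int) with hn
  have hn0 : 0 ≤ n := by positivity
  have hend : min (n - 1) (c + w) + 1 = min n (c + w + 1) := by omega
  rw [hend,
    PySem.List.foldl_append_ite (fun i => i ≠ c) (fun i => PySem.List.pyGetD sentence i "")]
  simp only [List.nil_append]
  have hL : max 0 (c - w) = (((max 0 (c - w)).toNat : Nat) : Int) := by omega
  by_cases hneg : min n (c + w + 1) < 0
  · -- window entirely before position 0: both sides are empty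
    have hmax : max 0 (min n (c + w + 1)) = ((0 : Nat) : Int) := by omega
    rw [PySem.List.pyRange_one_eq_nil (by omega), hmax, hL,
      if_neg (by omega), PySem.List.slice_natCast]
    simp
  · have hB : max 0 (min n (c + w + 1)) = (((min n (c + w + 1)).toNat : Nat) : Int) := by omega
    have hA : min n (c + w + 1) = (((min n (c + w + 1)).toNat : Nat) : Int) := by omega
    rw [hB, hL, hA]
    exact pv_core sentence _ _ c (by omega)

-- ===== VERDICT (by name: the statement is the Claim_ definition above) =====
theorem get_context_words_spec : Claim_equal_get_context_words := by
  intro sentence c w _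
  unfold Spec_get_context_words
  exact get_context_words_eq sentence c w
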